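-- pv_equiv track=rewrite | github.com/CYUBAHIROPhilomene/String_assignment | ex2.py | word_indices
-- ===== SOURCE A (Python) =====
-- def word_indices(text):
--     words = text.lower().split()
--     word_dict = {}
--     for index, word in enumerate(words):
--
--         if word in word_dict:
--             word_dict[word].append(index)
--         else:
--             word_dict[word] = [index]
--
--     return word_dict
-- ===== SOURCE B (Python) =====
-- def word_indices(text):
--     words = text.lower().split()
--     return {w: [i for i, x in enumerate(words) if x == w]
--             for w in dict.fromkeys(words)}
-- ===== Notes on version B (the rewrite author's own statement) =====
-- stated objective: alternative
-- what changed: Replaces the single-pass membership-test-and-append dict loop by a two-phase pipeline: dedup the words in first-occurrence order with dict.fromkeys, then build each word's index list by a comprehension scanning enumerate(words), assembled in one dict comprehension.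
import Mathlib
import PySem

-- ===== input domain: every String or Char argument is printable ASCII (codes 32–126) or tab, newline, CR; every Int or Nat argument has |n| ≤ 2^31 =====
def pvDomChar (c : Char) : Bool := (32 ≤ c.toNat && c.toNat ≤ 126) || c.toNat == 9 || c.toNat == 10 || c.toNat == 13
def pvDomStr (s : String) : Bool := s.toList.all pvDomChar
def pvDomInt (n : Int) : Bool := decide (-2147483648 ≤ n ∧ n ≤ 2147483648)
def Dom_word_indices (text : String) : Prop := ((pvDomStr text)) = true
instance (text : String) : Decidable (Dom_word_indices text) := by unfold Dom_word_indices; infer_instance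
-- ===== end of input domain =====

-- B replaces A's single-pass membership-test-and-append loop with a dedup-then-per-word-scan
-- dict comprehension (alternative decomposition, not faster); return values proved equal.

-- ===== PORT A =====
-- words = text.lower().split(); loop over enumerate(words) growing a dict; return it
def word_indices (text : String) : List (String × List Int) :=
  let words := PySem.Str.split₀ (PySem.Str.lower text)
  let d := (PySem.List.enumerate words 0).foldl
    (fun (d : PySem.Dict String (List Int)) p =>
      if d.contains p.2 then d.insert p.2 (d.getD p.2 [] ++ [p.1])  -- word_dict[word].append(index)
      else d.insert p.2 [p.1])                                      -- word_dict[word] = [index]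
    PySem.Dict.empty
  d.items

-- ===== PORT B =====
-- {w: [i for i, x in enumerate(words) if x == w] for w in dict.fromkeys(words)}
def word_indices_alt (text : String) : List (String × List Int) :=
  let words := PySem.Str.split₀ (PySem.Str.lower text)
  (PySem.Dict.ofList ((PySem.List.dedup words).map
    (fun w => (w, ((PySem.List.enumerate words 0).filter (fun p => p.2 == w)).map (·.1))))).items

-- ===== PRECONDITION & SPEC =====
def Spec_word_indices (text : String) (out : List (String × List Int)) : Prop := out = word_indices_alt text
instance (text : String) (out : List (String × List Int)) : Decidable (Spec_word_indices text out) := by unfold Spec_word_indices; infer_instance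

-- ===== CLAIM (what is proved, stated in full; the proofs are below) =====
def Claim_equal_word_indices : Prop := ∀ (text : String), Dom_word_indices text → Spec_word_indices text (word_indices text)

-- ===== LEMMAS AND PROOFS =====

-- A's loop body is exactly 'modify word [] (· ++ [index])' over the key-value-swapped enumerate list
theorem step_eq (words : List String) :
    (PySem.List.enumerate words 0).foldl
      (fun (d : PySem.Dict String (List Int)) p =>
        if d.contains p.2 then d.insert p.2 (d.getD p.2 [] ++ [p.1])
        else d.insert p.2 [p.1]) PySem.Dict.empty
    = ((PySem.List.enumerate words 0).map (fun p => (p.2, p.1))).foldl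
        (fun (d : PySem.Dict String (List Int)) p => d.modify p.1 [] (fun x => x ++ [p.2]))
        PySem.Dict.empty := by
  rw [List.foldl_map]
  congr 1
  funext d p
  by_cases h : d.contains p.2
  · simp [h, PySem.Dict.modify, PySem.Dict.getD_eq_get?_getD]
  · simp [h, PySem.Dict.modify, PySem.Dict.getD_of_not_contains _ _ (by simpa using h)]

-- the items of A's grouping dict are B's dict comprehension, for any word list
theorem main_items (words : List String) :
    ((PySem.List.enumerate words 0).foldl
      (fun (d : PySem.Dict String (List Int)) p =>
        if d.contains p.2 then d.insert p.2 (d.getD p.2 [] ++ [p.1])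
        else d.insert p.2 [p.1]) PySem.Dict.empty).items
    = (PySem.Dict.ofList ((PySem.List.dedup words).map
        (fun w => (w, ((PySem.List.enumerate words 0).filter (fun p => p.2 == w)).map (·.1))))).items := by
  rw [step_eq]
  set l := (PySem.List.enumerate words 0).map (fun p => (p.2, p.1)) with hl
  set F := l.foldl (fun (d : PySem.Dict String (List Int)) p => d.modify p.1 [] (fun x => x ++ [p.2])) PySem.Dict.empty with hF
  have hmapfst : l.map (fun p => p.1) = words := by
    rw [hl, List.map_map]
    exact PySem.List.map_snd_enumerate words 0
  have hkeys : F.keys = PySem.Set.ofList words := by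
    rw [hF, PySem.Dict.keys_foldl_modify_key l (fun p => p.1) [] (fun _ p x => x ++ [p.2]) PySem.Dict.empty,
      PySem.Dict.keys_empty, PySem.Set.update_nil_left, hmapfst]
  have hnd : (PySem.Set.ofList words : List String).Nodup := PySem.Set.nodup_ofList words
  rw [PySem.Dict.items_eq_map_keys F (by rw [hkeys]; exact hnd) [], hkeys]
  have hfresh : ∀ a ∈ ((PySem.List.dedup words).map
      (fun w => (w, ((PySem.List.enumerate words 0).filter (fun p => p.2 == w)).map (·.1)))),
      (PySem.Dict.empty : PySem.Dict String (List Int)).contains a.1 = false := by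
    intro a _; simp [PySem.Dict.contains_empty]
  have hndk : (((PySem.List.dedup words).map
      (fun w => (w, ((PySem.List.enumerate words 0).filter (fun p => p.2 == w)).map (·.1)))).map
      (fun q => q.1)).Nodup := by
    have h1 : (((PySem.List.dedup words).map
        (fun w => (w, ((PySem.List.enumerate words 0).filter (fun p => p.2 == w)).map (·.1)))).map
        (fun q => q.1)) = PySem.List.dedup words := by simp [List.map_map, Function.comp_def]
    rw [h1, PySem.List.dedup_eq_ofList]; exact hnd
  rw [show PySem.Dict.ofList ((PySem.List.dedup words).map
        (fun w => (w, ((PySem.List.enumerate words 0).filter (fun p => p.2 == w)).map (·.1))))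
      = ((PySem.List.dedup words).map
        (fun w => (w, ((PySem.List.enumerate words 0).filter (fun p => p.2 == w)).map (·.1)))).foldl
        (fun acc q => acc.insert q.1 q.2) PySem.Dict.empty from rfl]
  rw [PySem.Dict.items_foldl_insert_fresh _ (fun q => q.1) (fun q => q.2) PySem.Dict.empty hfresh hndk]
  have hie : (PySem.Dict.empty : PySem.Dict String (List Int)).items = [] := rfl
  simp only [hie, List.nil_append, List.map_map, PySem.List.dedup_eq_ofList]
  apply List.map_congr_left
  intro w hw
  simp only [Function.comp]
  congr 1
  have := PySem.Dict.getD_foldl_modify_append l PySem.Dict.empty w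
  rw [hF, this]
  simp [hl, List.filter_map, Function.comp_def, List.map_map]

-- ===== VERDICT (by name: the statement is the Claim_ definition above) =====
theorem word_indices_spec : Claim_equal_word_indices := by
  intro text _
  unfold Spec_word_indices word_indices word_indices_alt
  exact main_items _
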